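-- pv_equiv track=rewrite | github.com/xxcocoymlxx/Study-Notes | CSC108/a1/a1_part2_ver1.py | find_astrological_sign
-- ===== SOURCE A (Python) =====
-- SIGNS = 'ARI:03,21-04,19;TAU:04,20-05,20;GEM:05,21-06,21;CAN:06,22-07,22;' + \
--         'LEO:07,23-08,22;VIR:08,23-09,22;LIB:09,23-10,23;SCO:10,24-11,20;' + \
--         'SAG:11,21-12,21;CAP:12,22-01,20;AQU:01,21-02,21;PIS:02,22-03,20;'
--
-- def find_astrological_sign(month, date):
--     '''
--     (int, int) -> str
--
--     Given two int values representing a month and a date, return a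
--     3-character string that gives us what star sign a person born in that
--     month and on that date belongs to. Use the SIGNS string (already
--     defined for you at the top of this file) to figure this out.
--
--     NOTE FROM BOB: A lot of string slicing to do here. It looks like the
--                    information for each sign is exactly 16 characters long.
--                    We can probably use that.
--
--     >>> find_astrological_sign(9, 2)
--     'VIR'
--
--     >>> find_astrological_sign(10, 23)
--     'LIB'
--
--     >>> find_astrological_sign(1, 14)
--     'CAP'
--     '''
--     i = 0
--     group = ''
--     while i < len(SIGNS):
--         if SIGNS[i] != ';':
--             group += SIGNS[i]
--         elif SIGNS[i] == ';':
--             if month == int(group[4 : 6]):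
--                 if int(group[7 : 9]) <= date and date <= 31:
--                     return group[:3]
--             elif month == int(group[10 : 12]):
--                 if 1 <= date and date <= int(group[13 : 15]):
--                     return group[:3]
--             group = ''
--         i += 1
-- ===== SOURCE B (Python) =====
-- # B: parse SIGNS once into a record table, then scan the records; simpler decomposition, same results.
-- SIGNS = 'ARI:03,21-04,19;TAU:04,20-05,20;GEM:05,21-06,21;CAN:06,22-07,22;' + \
--         'LEO:07,23-08,22;VIR:08,23-09,22;LIB:09,23-10,23;SCO:10,24-11,20;' + \
--         'SAG:11,21-12,21;CAP:12,22-01,20;AQU:01,21-02,21;PIS:02,22-03,20;'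
--
-- _TABLE = [(rec[:3], int(rec[4:6]), int(rec[7:9]), int(rec[10:12]), int(rec[13:15]))
--           for rec in SIGNS.split(';') if rec]
--
-- def find_astrological_sign(month, date):
--     for name, start_month, start_day, end_month, end_day in _TABLE:
--         if month == start_month:
--             if start_day <= date <= 31:
--                 return name
--         elif month == end_month:
--             if 1 <= date <= end_day:
--                 return name
-- ===== Notes on version B (the rewrite author's own statement) =====
-- stated objective: simpler
-- what changed: B parses SIGNS once into a table of (name, start_month, start_day, end_month, end_day) records via split(';') and then scans the records, instead of A's character-by-character while loop that re-accumulates and re-slices each 16-char group on every call.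
import Mathlib
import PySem

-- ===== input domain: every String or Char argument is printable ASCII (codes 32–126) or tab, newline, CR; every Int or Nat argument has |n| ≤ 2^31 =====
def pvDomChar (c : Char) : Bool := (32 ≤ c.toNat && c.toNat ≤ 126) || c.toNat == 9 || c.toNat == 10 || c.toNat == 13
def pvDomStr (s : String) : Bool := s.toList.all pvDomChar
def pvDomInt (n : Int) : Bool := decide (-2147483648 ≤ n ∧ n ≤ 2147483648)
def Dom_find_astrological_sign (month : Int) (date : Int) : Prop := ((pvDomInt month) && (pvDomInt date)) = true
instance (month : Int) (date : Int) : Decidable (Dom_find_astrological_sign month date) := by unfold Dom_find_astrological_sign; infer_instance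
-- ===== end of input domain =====

set_option maxRecDepth 20000


-- B re-decomposes A's char-by-char scan as a parsed record table scanned once per call; return values are identical (both fall through to None).

-- ===== PORT A =====
-- the module constant SIGNS, as its character list
def pvSIGNS : List Char := ("ARI:03,21-04,19;TAU:04,20-05,20;GEM:05,21-06,21;CAN:06,22-07,22;" ++ "LEO:07,23-08,22;VIR:08,23-09,22;LIB:09,23-10,23;SCO:10,24-11,20;" ++ "SAG:11,21-12,21;CAP:12,22-01,20;AQU:01,21-02,21;PIS:02,22-03,20;").toList

-- the body of A's `elif SIGNS[i] == ';'` branch: the slicing/int()/comparison checks on the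
-- accumulated group.  int(...) is ported as (PySem.Int.ofChars? …).getD 0: on every group A
-- ever parses the slice is two digits, so int() never raises and the default is never used.
def pvCheckA (group : List Char) (month date : Int) : Option String :=
  if month = (PySem.Int.ofChars? (PySem.List.slice group (some 4) (some 6))).getD 0 then
    if (PySem.Int.ofChars? (PySem.List.slice group (some 7) (some 9))).getD 0 ≤ date ∧ date ≤ 31 then
      some (String.ofList (PySem.List.slice group none (some 3)))
    else none
  else if month = (PySem.Int.ofChars? (PySem.List.slice group (some 10) (some 12))).getD 0 then
    if 1 ≤ date ∧ date ≤ (PySem.Int.ofChars? (PySem.List.slice group (some 13) (some 15))).getD 0 then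
      some (String.ofList (PySem.List.slice group none (some 3)))
    else none
  else none

-- A's while loop over SIGNS, accumulating `group`; the early `return group[:3]` is the
-- `some` branch of pvCheckA, encoded with Option.orElse (first hit wins, else continue with group = '')
def pvLoopA (month date : Int) : List Char → List Char → Option String
  | [], _ => none
  | c :: rest, group =>
    if c ≠ ';' then pvLoopA month date rest (group ++ [c])
    else (pvCheckA group month date).orElse (fun _ => pvLoopA month date rest [])

def find_astrological_sign (month : Int) (date : Int) : Option String :=
  pvLoopA month date pvSIGNS []

-- ===== PORT B =====
-- Source B: _TABLE = [(rec[:3], int(rec[4:6]), int(rec[7:9]), int(rec[10:12]), int(rec[13:15]))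
--                 for rec in SIGNS.split(';') if rec]
-- int(...) again as (ofChars? …).getD 0: every kept record has two digits there, so int() never raises.
def pvParseB (r : List Char) : String × Int × Int × Int × Int :=
  (String.ofList (PySem.List.slice r none (some 3)),
   (PySem.Int.ofChars? (PySem.List.slice r (some 4) (some 6))).getD 0,
   (PySem.Int.ofChars? (PySem.List.slice r (some 7) (some 9))).getD 0,
   (PySem.Int.ofChars? (PySem.List.slice r (some 10) (some 12))).getD 0,
   (PySem.Int.ofChars? (PySem.List.slice r (some 13) (some 15))).getD 0)

def pvTableB : List (String × Int × Int × Int × Int) :=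
  ((PySem.Chars.splitOn pvSIGNS [';']).filter (fun r => r ≠ [])).map pvParseB

-- Source B's for loop over _TABLE; the early `return name` is encoded with Option.orElse
def pvLoopB (month date : Int) : List (String × Int × Int × Int × Int) → Option String
  | [] => none
  | (name, sm, sd, em, ed) :: rest =>
    ((if month = sm then (if sd ≤ date ∧ date ≤ 31 then some name else none)
      else if month = em then (if 1 ≤ date ∧ date ≤ ed then some name else none)
      else none : Option String)).orElse (fun _ => pvLoopB month date rest)

def find_astrological_sign_alt (month : Int) (date : Int) : Option String :=
  pvLoopB month date pvTableB

-- ===== PRECONDITION & SPEC =====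
def Spec_find_astrological_sign (month : Int) (date : Int) (out : Option String) : Prop := out = find_astrological_sign_alt month date
instance (month : Int) (date : Int) (out : Option String) : Decidable (Spec_find_astrological_sign month date out) := by unfold Spec_find_astrological_sign; infer_instance

-- ===== CLAIM (what is proved, stated in full; the proofs are below) =====
def Claim_equal_find_astrological_sign : Prop := ∀ (month : Int) (date : Int), Dom_find_astrological_sign month date → Spec_find_astrological_sign month date (find_astrological_sign month date)

-- ===== LEMMAS AND PROOFS =====
-- the 12 sign records, i.e. SIGNS cut at each ';'
def pvGroups : List (List Char) :=
  ["ARI:03,21-04,19".toList, "TAU:04,20-05,20".toList, "GEM:05,21-06,21".toList,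
   "CAN:06,22-07,22".toList, "LEO:07,23-08,22".toList, "VIR:08,23-09,22".toList,
   "LIB:09,23-10,23".toList, "SCO:10,24-11,20".toList, "SAG:11,21-12,21".toList,
   "CAP:12,22-01,20".toList, "AQU:01,21-02,21".toList, "PIS:02,22-03,20".toList]

lemma pvSIGNS_eq : pvSIGNS = (pvGroups.map (· ++ [';'])).flatten := by decide

lemma pvGroups_nosemi : ∀ g ∈ pvGroups, ';' ∉ g := by decide

lemma pvTableB_eq : pvTableB = pvGroups.map pvParseB := by decide

-- A's loop across one ';'-terminated group: it accumulates the group's characters and then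
-- runs the checks on acc ++ g, continuing with an empty accumulator on a miss
lemma loopA_group (m d : Int) (g acc rest : List Char) (h : ';' ∉ g) :
    pvLoopA m d (g ++ ';' :: rest) acc
      = (pvCheckA (acc ++ g) m d).orElse (fun _ => pvLoopA m d rest []) := by
  induction g generalizing acc with
  | nil => simp [pvLoopA]
  | cons c g ih =>
    have hc : c ≠ ';' := by rintro rfl; exact h (List.mem_cons_self ..)
    have := ih (acc := acc ++ [c]) (fun hm => h (List.mem_cons_of_mem _ hm))
    simpa [pvLoopA, hc, List.append_assoc] using this

-- A's loop over any ';'-terminated group sequence agrees with B's loop over the parsed records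
lemma loop_main (m d : Int) (gs : List (List Char)) (h : ∀ g ∈ gs, ';' ∉ g) :
    pvLoopA m d ((gs.map (· ++ [';'])).flatten) [] = pvLoopB m d (gs.map pvParseB) := by
  induction gs with
  | nil => simp [pvLoopA, pvLoopB]
  | cons g gs ih =>
    have hg : ';' ∉ g := h g (List.mem_cons_self ..)
    have hrest := ih (fun x hx => h x (List.mem_cons_of_mem _ hx))
    have hfl : (((g :: gs).map (· ++ [';'])).flatten) = g ++ ';' :: (gs.map (· ++ [';'])).flatten := by
      simp
    rw [hfl, loopA_group m d g [] _ hg]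
    simp [pvLoopB, pvParseB, pvCheckA, hrest]

-- ===== VERDICT (by name: the statement is the Claim_ definition above) =====
theorem find_astrological_sign_spec : Claim_equal_find_astrological_sign := by
  intro m d _
  unfold Spec_find_astrological_sign
  rw [find_astrological_sign, find_astrological_sign_alt, pvSIGNS_eq, pvTableB_eq]
  exact loop_main m d pvGroups pvGroups_nosemi
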